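-- pv_equiv track=rewrite | github.com/swm-sink/ai-pod-nobody-knows | langgraph-migration/src/agents/research_discovery.py | _categorize_sources
-- ===== SOURCE A (Python) =====
-- from typing import Dict, List, Any, Optional
--
-- def _categorize_sources(sources) -> Dict[str, int]:
--     """Categorize sources by type"""
--     categories = {
--         "academic": 0,
--         "news": 0,
--         "industry": 0,
--         "government": 0,
--         "other": 0
--     }
--
--     for source in sources:
--         url = source.get("url", "").lower()
--         if any(domain in url for domain in ['.edu', 'scholar', 'academic', 'journal']):
--             categories["academic"] += 1
--         elif any(domain in url for domain in ['news', 'times', 'post', 'cnn', 'bbc']):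
--             categories["news"] += 1
--         elif any(domain in url for domain in ['.gov', 'government']):
--             categories["government"] += 1
--         elif any(domain in url for domain in ['company', 'corp', '.com']):
--             categories["industry"] += 1
--         else:
--             categories["other"] += 1
--
--     return categories
-- ===== SOURCE B (Python) =====
-- _PRIORITY = [
--     ("academic", ('.edu', 'scholar', 'academic', 'journal')),
--     ("news", ('news', 'times', 'post', 'cnn', 'bbc')),
--     ("government", ('.gov', 'government')),
--     ("industry", ('company', 'corp', '.com')),
-- ]
--
--
-- def _categorize_sources(sources):
--     """Categorize sources by type, category-major: each category in priority
--     order filters its matches out of the remaining pool; leftovers are 'other'."""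
--     counts = {"academic": 0, "news": 0, "industry": 0, "government": 0, "other": 0}
--     remaining = [s.get("url", "").lower() for s in sources]
--     for cat, keys in _PRIORITY:
--         matched = [u for u in remaining if any(k in u for k in keys)]
--         remaining = [u for u in remaining if not any(k in u for k in keys)]
--         counts[cat] = len(matched)
--     counts["other"] = len(remaining)
--     return counts
-- ===== Notes on version B (the rewrite author's own statement) =====
-- stated objective: alternative
-- what changed: Replaces A's source-major loop (if/elif chain incrementing a counter per source) with a category-major sieve: urls are extracted once, then each category in priority order filters its matches out of the remaining pool and counts them, the final leftovers being 'other'.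
import Mathlib
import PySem

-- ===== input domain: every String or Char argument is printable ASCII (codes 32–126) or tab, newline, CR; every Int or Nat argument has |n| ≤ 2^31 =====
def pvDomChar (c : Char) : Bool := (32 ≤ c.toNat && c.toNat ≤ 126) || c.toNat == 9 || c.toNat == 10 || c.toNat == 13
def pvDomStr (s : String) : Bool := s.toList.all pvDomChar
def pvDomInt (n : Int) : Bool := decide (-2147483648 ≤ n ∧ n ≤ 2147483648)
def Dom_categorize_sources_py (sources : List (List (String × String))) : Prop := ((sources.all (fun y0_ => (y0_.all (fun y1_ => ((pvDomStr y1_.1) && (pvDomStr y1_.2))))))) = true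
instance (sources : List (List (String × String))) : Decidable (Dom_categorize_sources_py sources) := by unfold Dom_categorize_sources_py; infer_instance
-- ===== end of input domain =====

-- B is category-major instead of source-major: it extracts all urls once, then each category in
-- priority order filters its matches out of the remaining pool and the leftovers become 'other'.

-- ===== PORT A =====
def categorize_sources_py (sources : List (List (String × String))) : List (String × Int) :=
  (sources.foldl (fun cats source =>
      let url := PySem.Str.lower (PySem.Dict.getD (PySem.Dict.ofList source) "url" "")
      if [".edu", "scholar", "academic", "journal"].any (fun d => PySem.Str.isIn d url) then
        cats.modify "academic" 0 (· + 1)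
      else if ["news", "times", "post", "cnn", "bbc"].any (fun d => PySem.Str.isIn d url) then
        cats.modify "news" 0 (· + 1)
      else if [".gov", "government"].any (fun d => PySem.Str.isIn d url) then
        cats.modify "government" 0 (· + 1)
      else if ["company", "corp", ".com"].any (fun d => PySem.Str.isIn d url) then
        cats.modify "industry" 0 (· + 1)
      else
        cats.modify "other" 0 (· + 1))
    (PySem.Dict.ofList [("academic", 0), ("news", 0), ("industry", 0), ("government", 0), ("other", 0)])).items

-- ===== PORT B =====
def pvPriority : List (String × List String) :=
  [("academic", [".edu", "scholar", "academic", "journal"]),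
   ("news", ["news", "times", "post", "cnn", "bbc"]),
   ("government", [".gov", "government"]),
   ("industry", ["company", "corp", ".com"])]

def categorize_sources_py_alt (sources : List (List (String × String))) : List (String × Int) :=
  let counts0 : PySem.Dict String Int :=
    PySem.Dict.ofList [("academic", 0), ("news", 0), ("industry", 0), ("government", 0), ("other", 0)]
  let remaining0 := sources.map (fun s => PySem.Str.lower (PySem.Dict.getD (PySem.Dict.ofList s) "url" ""))
  let st := pvPriority.foldl (fun (st : PySem.Dict String Int × List String) rule =>
      let matched := st.2.filter (fun u => rule.2.any (fun k => PySem.Str.isIn k u))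
      let remaining := st.2.filter (fun u => !(rule.2.any (fun k => PySem.Str.isIn k u)))
      (st.1.insert rule.1 (matched.length : Int), remaining)) (counts0, remaining0)
  (st.1.insert "other" (st.2.length : Int)).items

-- ===== PRECONDITION & SPEC =====
def Spec_categorize_sources_py (sources : List (List (String × String))) (out : List (String × Int)) : Prop := out = categorize_sources_py_alt sources
instance (sources : List (List (String × String))) (out : List (String × Int)) : Decidable (Spec_categorize_sources_py sources out) := by unfold Spec_categorize_sources_py; infer_instance

-- ===== CLAIM (what is proved, stated in full; the proofs are below) =====
def Claim_equal_categorize_sources_py : Prop := ∀ (sources : List (List (String × String))), Dom_categorize_sources_py sources → Spec_categorize_sources_py sources (categorize_sources_py sources)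

-- ===== LEMMAS AND PROOFS =====
def pvUrl (source : List (String × String)) : String :=
  PySem.Str.lower (PySem.Dict.getD (PySem.Dict.ofList source) "url" "")

def pvmA (u : String) : Bool := [".edu", "scholar", "academic", "journal"].any (fun d => PySem.Str.isIn d u)
def pvmN (u : String) : Bool := ["news", "times", "post", "cnn", "bbc"].any (fun d => PySem.Str.isIn d u)
def pvmG (u : String) : Bool := [".gov", "government"].any (fun d => PySem.Str.isIn d u)
def pvmI (u : String) : Bool := ["company", "corp", ".com"].any (fun d => PySem.Str.isIn d u)

-- the value both ports compute, phrased with B's nested filters over the url list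
def pvCanon (L : List String) (a n i g o : Int) : List (String × Int) :=
  [("academic", a + ((L.filter pvmA).length : Int)),
   ("news",     n + (((L.filter (fun u => !pvmA u)).filter pvmN).length : Int)),
   ("industry", i + (((((L.filter (fun u => !pvmA u)).filter (fun u => !pvmN u)).filter (fun u => !pvmG u)).filter pvmI).length : Int)),
   ("government", g + ((((L.filter (fun u => !pvmA u)).filter (fun u => !pvmN u)).filter pvmG).length : Int)),
   ("other",    o + (((((L.filter (fun u => !pvmA u)).filter (fun u => !pvmN u)).filter (fun u => !pvmG u)).filter (fun u => !pvmI u)).length : Int))]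

theorem pv_bumpA (a n i g o : Int) :
    (PySem.Dict.ofList [("academic",a),("news",n),("industry",i),("government",g),("other",o)]).modify "academic" 0 (· + 1)
    = PySem.Dict.ofList [("academic",a+1),("news",n),("industry",i),("government",g),("other",o)] := rfl
theorem pv_bumpN (a n i g o : Int) :
    (PySem.Dict.ofList [("academic",a),("news",n),("industry",i),("government",g),("other",o)]).modify "news" 0 (· + 1)
    = PySem.Dict.ofList [("academic",a),("news",n+1),("industry",i),("government",g),("other",o)] := rfl
theorem pv_bumpG (a n i g o : Int) :
    (PySem.Dict.ofList [("academic",a),("news",n),("industry",i),("government",g),("other",o)]).modify "government" 0 (· + 1)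
    = PySem.Dict.ofList [("academic",a),("news",n),("industry",i),("government",g+1),("other",o)] := rfl
theorem pv_bumpI (a n i g o : Int) :
    (PySem.Dict.ofList [("academic",a),("news",n),("industry",i),("government",g),("other",o)]).modify "industry" 0 (· + 1)
    = PySem.Dict.ofList [("academic",a),("news",n),("industry",i+1),("government",g),("other",o)] := rfl
theorem pv_bumpO (a n i g o : Int) :
    (PySem.Dict.ofList [("academic",a),("news",n),("industry",i),("government",g),("other",o)]).modify "other" 0 (· + 1)
    = PySem.Dict.ofList [("academic",a),("news",n),("industry",i),("government",g),("other",o+1)] := rfl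

theorem pv_items (la ln lg li lo : Int) :
    ((((((PySem.Dict.ofList [("academic",(0:Int)),("news",0),("industry",0),("government",0),("other",0)]).insert
        "academic" la).insert "news" ln).insert "government" lg).insert "industry" li).insert "other" lo).items
    = [("academic",la),("news",ln),("industry",li),("government",lg),("other",lo)] := rfl

theorem pvA_loop (sources : List (List (String × String))) : ∀ (a n i g o : Int),
    ((sources.foldl (fun cats source =>
        if pvmA (pvUrl source) then cats.modify "academic" 0 (· + 1)
        else if pvmN (pvUrl source) then cats.modify "news" 0 (· + 1)
        else if pvmG (pvUrl source) then cats.modify "government" 0 (· + 1)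
        else if pvmI (pvUrl source) then cats.modify "industry" 0 (· + 1)
        else cats.modify "other" 0 (· + 1))
      (PySem.Dict.ofList [("academic", a), ("news", n), ("industry", i), ("government", g), ("other", o)])).items)
    = pvCanon (sources.map pvUrl) a n i g o := by
  induction sources with
  | nil => intro a n i g o; simp [pvCanon, PySem.Dict.ofList]; rfl
  | cons s rest ih =>
    intro a n i g o
    rw [List.foldl_cons, List.map_cons]
    cases hA : pvmA (pvUrl s) <;> cases hN : pvmN (pvUrl s) <;>
      cases hG : pvmG (pvUrl s) <;> cases hI : pvmI (pvUrl s) <;>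
      simp only [hA, hN, hG, hI, Bool.false_eq_true, if_true, if_false] <;>
      first
        | rw [pv_bumpA, ih]
        | rw [pv_bumpN, ih]
        | rw [pv_bumpG, ih]
        | rw [pv_bumpI, ih]
        | rw [pv_bumpO, ih]
    all_goals simp [pvCanon, hA, hN, hG, hI] <;> omega

theorem pvB_eq (sources : List (List (String × String))) :
    categorize_sources_py_alt sources = pvCanon (sources.map pvUrl) 0 0 0 0 0 := by
  unfold categorize_sources_py_alt pvPriority
  simp only [List.foldl_cons, List.foldl_nil]
  rw [pv_items]
  simp only [pvCanon, zero_add]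
  rfl

-- ===== VERDICT (by name: the statement is the Claim_ definition above) =====
theorem categorize_sources_py_spec : Claim_equal_categorize_sources_py := by
  intro sources _
  show categorize_sources_py sources = categorize_sources_py_alt sources
  rw [pvB_eq]
  exact pvA_loop sources 0 0 0 0 0
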